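-- pv_equiv track=rewrite | github.com/vllm-project/vllm | neuralmagic/tools/profiler/visualize_trace.py | abbreviate_known_names
-- ===== SOURCE A (Python) =====
-- def abbreviate_known_names(name: str):
--     abbreviations = {
--         "MergedColumnParallelLinear": "MCPLinear",
--         "QKVParallelLinear": "QKVPLinear",
--         "RowParallelLinear": "RPLinear",
--         "weight=": "w=",
--         "bfloat16": "bf16",
--         "float16": "f16",
--     }
--     for key, value in abbreviations.items():
--         name = name.replace(key, value)
--     return name
-- ===== SOURCE B (Python) =====
-- def abbreviate_known_names(name: str):
--     # known substrings and their abbreviations, tried in this order at each position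
--     table = [
--         ("MergedColumnParallelLinear", "MCPLinear"),
--         ("QKVParallelLinear", "QKVPLinear"),
--         ("RowParallelLinear", "RPLinear"),
--         ("weight=", "w="),
--         ("bfloat16", "bf16"),
--         ("float16", "f16"),
--     ]
--     out = []
--     i = 0
--     n = len(name)
--     while i < n:
--         for key, value in table:
--             if name.startswith(key, i):
--                 out.append(value)
--                 i += len(key)
--                 break
--         else:
--             out.append(name[i])
--             i += 1
--     return "".join(out)
-- ===== Notes on version B (the rewrite author's own statement) =====
-- stated objective: idiomatic
-- what changed: Replaces six sequential whole-string replace passes by one left-to-right scan that tries the table keys in insertion order at each position and emits the abbreviation of the first match.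
import Mathlib
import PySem

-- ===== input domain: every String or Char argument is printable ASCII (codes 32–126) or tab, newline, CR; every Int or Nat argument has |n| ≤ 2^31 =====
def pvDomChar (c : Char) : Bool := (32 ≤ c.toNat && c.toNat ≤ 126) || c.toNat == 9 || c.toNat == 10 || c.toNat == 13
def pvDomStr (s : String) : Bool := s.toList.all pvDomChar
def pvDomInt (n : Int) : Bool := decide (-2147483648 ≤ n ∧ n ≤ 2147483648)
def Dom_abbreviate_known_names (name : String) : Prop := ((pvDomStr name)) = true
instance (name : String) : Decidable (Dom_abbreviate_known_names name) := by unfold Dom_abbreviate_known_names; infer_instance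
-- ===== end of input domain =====

-- B replaces A's six sequential whole-string replace passes by ONE left-to-right
-- scan that, at each position, tries the table keys in insertion order and emits
-- the abbreviation of the first matching key (objective: idiomatic single pass).

-- ===== PORT A =====
-- literal transliteration: six sequential str.replace passes in dict order
def abbreviate_known_names (name : String) : String :=
  let name := PySem.Str.replace name "MergedColumnParallelLinear" "MCPLinear"
  let name := PySem.Str.replace name "QKVParallelLinear" "QKVPLinear"
  let name := PySem.Str.replace name "RowParallelLinear" "RPLinear"
  let name := PySem.Str.replace name "weight=" "w="
  let name := PySem.Str.replace name "bfloat16" "bf16"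
  let name := PySem.Str.replace name "float16" "f16"
  name

-- ===== PORT B =====
-- the abbreviation table in insertion order (B's `items`)
def pvTable : List (List Char × List Char) :=
  [("MergedColumnParallelLinear".toList, "MCPLinear".toList),
   ("QKVParallelLinear".toList, "QKVPLinear".toList),
   ("RowParallelLinear".toList, "RPLinear".toList),
   ("weight=".toList, "w=".toList),
   ("bfloat16".toList, "bf16".toList),
   ("float16".toList, "f16".toList)]

-- B's while loop: at the current position try the keys in order; on the first
-- match emit its value and jump past the key, else emit the character and move on.
-- `t.drop (q.1.length - 1)` equals `(c :: t).drop q.1.length` for the (nonempty)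
-- table keys — exactly B's `i += len(key)`; the `- 1` form only makes termination evident.
def pvMultiScan (ps : List (List Char × List Char)) : List Char → List Char
  | [] => []
  | c :: t =>
    match ps.find? (fun q => q.1.isPrefixOf (c :: t)) with
    | none => c :: pvMultiScan ps t
    | some q => q.2 ++ pvMultiScan ps (t.drop (q.1.length - 1))
termination_by l => l.length
decreasing_by
  all_goals simp only [List.length_drop, List.length_cons]
  all_goals omega

def abbreviate_known_names_alt (name : String) : String :=
  String.ofList (pvMultiScan pvTable name.toList)

-- ===== PRECONDITION & SPEC =====
def Spec_abbreviate_known_names (name : String) (out : String) : Prop := out = abbreviate_known_names_alt name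
instance (name : String) (out : String) : Decidable (Spec_abbreviate_known_names name out) := by unfold Spec_abbreviate_known_names; infer_instance

-- ===== CLAIM (what is proved, stated in full; the proofs are below) =====
def Claim_equal_abbreviate_known_names : Prop := ∀ (name : String), Dom_abbreviate_known_names name → Spec_abbreviate_known_names name (abbreviate_known_names name)

-- ===== LEMMAS AND PROOFS =====

-- a plain structural version of Python's str.replace on char lists (for old ≠ [])
def pvRep (old new : List Char) : List Char → List Char
  | [] => []
  | c :: t =>
    if old.isPrefixOf (c :: t) then new ++ pvRep old new (t.drop (old.length - 1))
    else c :: pvRep old new t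
termination_by l => l.length
decreasing_by
  all_goals simp only [List.length_drop, List.length_cons]
  all_goals omega

theorem pvRep_nil (old new : List Char) : pvRep old new [] = [] := by simp [pvRep]

theorem pvDrop_cons (c : Char) (t : List Char) (k : Nat) (hk : 1 ≤ k) :
    (c :: t).drop k = t.drop (k - 1) := by
  conv_lhs => rw [show k = (k - 1) + 1 by omega]
  simp [List.drop_succ_cons]

theorem pvRep_pos (old new : List Char) (l : List Char) (h : old <+: l) (hne : old ≠ []) :
    pvRep old new l = new ++ pvRep old new (l.drop old.length) := by
  cases l with
  | nil => cases hne (List.prefix_nil.mp h)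
  | cons c t =>
    rw [pvRep, if_pos (List.isPrefixOf_iff_prefix.mpr h),
        pvDrop_cons c t old.length (List.length_pos_of_ne_nil hne)]

theorem pvRep_neg (old new : List Char) (c : Char) (t : List Char) (h : ¬ old <+: (c :: t)) :
    pvRep old new (c :: t) = c :: pvRep old new t := by
  rw [pvRep, if_neg (by simpa [List.isPrefixOf_iff_prefix] using h)]

-- PySem's replace agrees with pvRep when old ≠ []
theorem pvReplaceGo_eq (old new : List Char) (hne : old ≠ []) :
    ∀ (fuel : Nat) (l acc : List Char), l.length ≤ fuel →
      PySem.Chars.replace.go old new fuel l acc = acc.reverse ++ pvRep old new l := by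
  intro fuel
  induction fuel with
  | zero =>
    intro l acc hl
    cases l with
    | nil => simp [PySem.Chars.replace.go, pvRep_nil]
    | cons c t => simp at hl
  | succ n ih =>
    intro l acc hl
    cases l with
    | nil => simp [PySem.Chars.replace.go, pvRep_nil]
    | cons c t =>
      rw [PySem.Chars.replace.go]
      by_cases hp : old.isPrefixOf (c :: t)
      · rw [if_pos hp]
        have hpre : old <+: (c :: t) := List.isPrefixOf_iff_prefix.mp hp
        have h1 : 1 ≤ old.length := List.length_pos_of_ne_nil hne
        have hl' : t.length + 1 ≤ n + 1 := by simpa using hl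
        have hlen : ((c :: t).drop old.length).length ≤ n := by
          simp only [List.length_drop, List.length_cons]; omega
        rw [ih _ _ hlen, pvRep_pos old new (c :: t) hpre hne]
        simp
      · rw [if_neg hp]
        have hlen : t.length ≤ n := by simpa using hl
        rw [ih _ _ hlen, pvRep_neg old new c t (fun h => hp (List.isPrefixOf_iff_prefix.mpr h))]
        simp

theorem pvReplace_eq (l old new : List Char) (hne : old ≠ []) :
    PySem.Chars.replace l old new = pvRep old new l := by
  rw [PySem.Chars.replace, if_neg (by simpa [List.isEmpty_iff] using hne)]
  simpa using pvReplaceGo_eq old new hne l.length l [] (Nat.le_refl _)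

-- side conditions under which one replace pass commutes past the scan: for each
-- later table entry q, no nonempty suffix of q's key is prefix-comparable with the
-- earlier value (C1) or the earlier key (C2), and no nonempty suffix of the earlier
-- value is prefix-comparable with q's key (C3)
def pvHyps (pat rep : List Char) (ps : List (List Char × List Char)) : Prop :=
  pat ≠ [] ∧ (∀ q ∈ ps, q.1 ≠ []) ∧
  ∀ q ∈ ps,
    (∀ s ∈ q.1.tails, s ≠ [] → ¬ s <+: rep ∧ ¬ rep <+: s) ∧
    (∀ s ∈ q.1.tails, s ≠ [] → ¬ s <+: pat ∧ ¬ pat <+: s) ∧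
    (∀ s ∈ rep.tails, s ≠ [] → ¬ q.1 <+: s ∧ ¬ s <+: q.1)

theorem pvScan_nil_ps (l : List Char) : pvMultiScan [] l = l := by
  induction l with
  | nil => simp [pvMultiScan]
  | cons c t ih => rw [pvMultiScan]; simp [ih]

-- the scan copies a block no key can match into or out of
theorem pvScan_notouch (ps : List (List Char × List Char))
    (a : List Char)
    (ha : ∀ s ∈ a.tails, s ≠ [] → ∀ q ∈ ps, ¬ q.1 <+: s ∧ ¬ s <+: q.1) :
    ∀ x, pvMultiScan ps (a ++ x) = a ++ pvMultiScan ps x := by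
  induction a with
  | nil => intro x; simp
  | cons c a' ih =>
    intro x
    have hfind : ps.find? (fun q => q.1.isPrefixOf (c :: (a' ++ x))) = none := by
      rw [List.find?_eq_none]
      intro q hq
      simp only [List.isPrefixOf_iff_prefix]
      intro hpre
      have := ha (c :: a') (by simp) (by simp) q hq
      rcases Nat.le_total q.1.length (c :: a').length with hle | hle
      · exact this.1 (List.prefix_of_prefix_length_le hpre
          (by simpa using List.prefix_append (c :: a') x) (by simpa using hle))
      · exact this.2 (List.prefix_of_prefix_length_le
          (by simpa using List.prefix_append (c :: a') x) hpre (by simpa using hle))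
    rw [List.cons_append, pvMultiScan, hfind]
    show c :: pvMultiScan ps (a' ++ x) = c :: a' ++ pvMultiScan ps x
    rw [ih (fun s hs hne q hq => ha s (by
      rw [List.mem_tails] at hs ⊢
      exact hs.trans (List.suffix_cons c a')) hne q hq) x]
    exact rfl

-- if pat matches at none of the first k positions, pvRep copies the first k characters
theorem pvRep_copy (old new : List Char) (k : Nat) :
    ∀ l, (∀ p, p < k → ¬ old <+: l.drop p) →
      pvRep old new l = l.take k ++ pvRep old new (l.drop k) := by
  induction k with
  | zero => intro l _; simp
  | succ n ih =>
    intro l hocc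
    cases l with
    | nil => simp [pvRep_nil]
    | cons c t =>
      have h0 : ¬ old <+: (c :: t) := by simpa using hocc 0 (Nat.succ_pos n)
      rw [pvRep_neg old new c t h0,
          ih t (fun p hp => by simpa using hocc (p + 1) (by omega))]
      simp

-- a suffix of a later key that matches the replaced string also matches the original
theorem pvMatch_rev (pat rep q : List Char)
    (hC1 : ∀ s ∈ q.tails, s ≠ [] → ¬ s <+: rep ∧ ¬ rep <+: s)
    (hne : pat ≠ []) :
    ∀ l s, s ∈ q.tails → ¬ pat <+: l → s <+: pvRep pat rep l → s <+: l := by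
  intro l
  induction l with
  | nil => intro s _ _ h; rw [pvRep_nil] at h; simpa using h
  | cons c t ih =>
    intro s hs hnp hpre
    rw [pvRep_neg pat rep c t hnp] at hpre
    cases s with
    | nil => exact List.nil_prefix
    | cons c' s' =>
      obtain ⟨hc, hpre'⟩ := List.cons_prefix_cons.mp hpre
      subst hc
      have hs' : s' ∈ q.tails := by
        rw [List.mem_tails] at hs ⊢
        exact (List.suffix_cons c' s').trans hs
      by_cases hpt : pat <+: t
      · cases s' with
        | nil => simpa [List.cons_prefix_cons] using List.nil_prefix
        | cons d s'' =>
          exfalso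
          rw [pvRep_pos pat rep t hpt hne] at hpre'
          have hcmp := hC1 (d :: s'') hs' (by simp)
          rcases Nat.le_total (d :: s'').length rep.length with hle | hle
          · exact hcmp.1 (List.prefix_of_prefix_length_le hpre' (List.prefix_append _ _) hle)
          · exact hcmp.2 (List.prefix_of_prefix_length_le (List.prefix_append _ _) hpre' hle)
      · exact List.cons_prefix_cons.mpr ⟨rfl, ih s' hs' hpt hpre'⟩

-- if a later key matches and pat does not, pat matches nowhere inside the key's window
theorem pvNoOcc (pat q : List Char)
    (hC2 : ∀ s ∈ q.tails, s ≠ [] → ¬ s <+: pat ∧ ¬ pat <+: s)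
    (l : List Char) (hnp : ¬ pat <+: l) (hq : q <+: l) :
    ∀ p, p < q.length → ¬ pat <+: l.drop p := by
  intro p hp hpat
  rcases Nat.eq_zero_or_pos p with rfl | hpos
  · exact hnp (by simpa using hpat)
  · have hsq : q.drop p ∈ q.tails := (List.mem_tails _ _).mpr (List.drop_suffix _ _)
    have hsne : q.drop p ≠ [] := by
      intro h
      have := List.drop_eq_nil_iff.mp h
      omega
    have hsl : q.drop p <+: l.drop p := by
      obtain ⟨r, rfl⟩ := hq
      exact ⟨r, (List.drop_append_of_le_length (Nat.le_of_lt hp)).symm⟩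
    have hcmp := hC2 (q.drop p) hsq hsne
    rcases Nat.le_total (q.drop p).length pat.length with hle | hle
    · exact hcmp.1 (List.prefix_of_prefix_length_le hsl hpat hle)
    · exact hcmp.2 (List.prefix_of_prefix_length_le hpat hsl hle)

theorem pvFind_congr {α : Type} (p p' : α → Bool) (l : List α)
    (h : ∀ x ∈ l, p x = p' x) : l.find? p = l.find? p' := by
  induction l with
  | nil => rfl
  | cons a t ih =>
    rw [List.find?_cons, List.find?_cons, h a (by simp)]
    cases p' a with
    | true => rfl
    | false => exact ih (fun x hx => h x (by simp [hx]))

-- main lemma: one replace pass before the scan = adding the pair in front of the table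
theorem pvScan_rep (pat rep : List Char) (ps : List (List Char × List Char))
    (H : pvHyps pat rep ps) :
    ∀ l, pvMultiScan ps (pvRep pat rep l) = pvMultiScan ((pat, rep) :: ps) l := by
  obtain ⟨hne, hpsne, hC⟩ := H
  intro l
  induction hn : l.length using Nat.strong_induction_on generalizing l with
  | _ n ih =>
  subst hn
  cases l with
  | nil => simp [pvRep_nil, pvMultiScan]
  | cons c t =>
    by_cases hp : pat <+: (c :: t)
    · -- pat matches at the front: both sides emit rep and continue past the key
      have h1 : 1 ≤ pat.length := List.length_pos_of_ne_nil hne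
      rw [pvRep_pos pat rep (c :: t) hp hne,
          pvScan_notouch ps rep (fun s hs hsne q hq => (hC q hq).2.2 s hs hsne) _,
          ih ((c :: t).drop pat.length).length
            (by simp only [List.length_drop, List.length_cons]; omega) _ rfl]
      conv_rhs => rw [pvMultiScan]
      rw [show ((pat, rep) :: ps).find? (fun q => q.1.isPrefixOf (c :: t)) = some (pat, rep) by
        simp [List.isPrefixOf_iff_prefix.mpr hp]]
      rw [pvDrop_cons c t pat.length h1]
    · -- pat does not match at the front
      have hrep : pvRep pat rep (c :: t) = c :: pvRep pat rep t := pvRep_neg pat rep c t hp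
      have hfind : ps.find? (fun q => q.1.isPrefixOf (c :: pvRep pat rep t))
                 = ps.find? (fun q => q.1.isPrefixOf (c :: t)) := by
        rw [← hrep]
        apply pvFind_congr
        intro q hq
        rw [Bool.eq_iff_iff]
        simp only [List.isPrefixOf_iff_prefix]
        constructor
        · intro h
          exact pvMatch_rev pat rep q.1 (hC q hq).1 hne (c :: t) q.1
            ((List.mem_tails _ _).mpr (List.suffix_refl _)) hp h
        · intro hql
          rw [pvRep_copy pat rep q.1.length (c :: t)
                (pvNoOcc pat q.1 (hC q hq).2.1 (c :: t) hp hql),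
              show (c :: t).take q.1.length = q.1 from (List.prefix_iff_eq_take.mp hql).symm]
          exact List.prefix_append _ _
      have hpf : pat.isPrefixOf (c :: t) = false :=
        Bool.eq_false_iff.mpr (fun h => hp (List.isPrefixOf_iff_prefix.mp h))
      cases hfc : ps.find? (fun q => q.1.isPrefixOf (c :: t)) with
      | none =>
        rw [hrep, pvMultiScan, hfind.trans hfc]
        conv_rhs => rw [pvMultiScan]
        rw [show ((pat, rep) :: ps).find? (fun q => q.1.isPrefixOf (c :: t)) = none by
          rw [List.find?_cons, hpf]
          exact hfc]
        show c :: pvMultiScan ps (pvRep pat rep t) = c :: pvMultiScan ((pat, rep) :: ps) t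
        rw [ih t.length (by simp) t rfl]
      | some q =>
        have hqmem : q ∈ ps := List.mem_of_find?_eq_some hfc
        have hql : q.1 <+: (c :: t) := by
          simpa [List.isPrefixOf_iff_prefix] using List.find?_some hfc
        have hq1 : 1 ≤ q.1.length := List.length_pos_of_ne_nil (hpsne q hqmem)
        have hqlen : q.1.length ≤ t.length + 1 := by simpa using hql.length_le
        have hcopy : pvRep pat rep (c :: t)
            = q.1 ++ pvRep pat rep ((c :: t).drop q.1.length) := by
          rw [pvRep_copy pat rep q.1.length (c :: t)
                (pvNoOcc pat q.1 (hC q hqmem).2.1 (c :: t) hp hql),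
              show (c :: t).take q.1.length = q.1 from (List.prefix_iff_eq_take.mp hql).symm]
        rw [hrep, pvMultiScan, hfind.trans hfc]
        conv_rhs => rw [pvMultiScan]
        rw [show ((pat, rep) :: ps).find? (fun q' => q'.1.isPrefixOf (c :: t)) = some q by
          rw [List.find?_cons, hpf]
          exact hfc]
        show q.2 ++ pvMultiScan ps ((pvRep pat rep t).drop (q.1.length - 1))
           = q.2 ++ pvMultiScan ((pat, rep) :: ps) (t.drop (q.1.length - 1))
        congr 1
        -- drop past the matched key commutes with pvRep
        have hdrop : (pvRep pat rep t).drop (q.1.length - 1)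
            = pvRep pat rep ((c :: t).drop q.1.length) := by
          have hh := congrArg (List.drop q.1.length) (hrep ▸ hcopy)
          rw [List.drop_append_of_le_length (Nat.le_refl _), List.drop_length,
              List.nil_append] at hh
          rw [← hh, pvDrop_cons c (pvRep pat rep t) q.1.length hq1]
        rw [hdrop,
            ih ((c :: t).drop q.1.length).length
              (by simp only [List.length_drop, List.length_cons]; omega) _ rfl,
            pvDrop_cons c t q.1.length hq1]

-- ===== VERDICT (by name: the statement is the Claim_ definition above) =====
theorem abbreviate_known_names_spec : Claim_equal_abbreviate_known_names := by
  intro name _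
  unfold Spec_abbreviate_known_names abbreviate_known_names abbreviate_known_names_alt
  apply String.ofList_toList.symm.trans ∘ congrArg String.ofList
  simp only [PySem.Str.toList_replace]
  rw [pvReplace_eq _ _ _ (by decide), pvReplace_eq _ _ _ (by decide),
      pvReplace_eq _ _ _ (by decide), pvReplace_eq _ _ _ (by decide),
      pvReplace_eq _ _ _ (by decide), pvReplace_eq _ _ _ (by decide)]
  rw [← pvScan_nil_ps (pvRep "float16".toList "f16".toList _)]
  rw [pvScan_rep _ _ _ (by unfold pvHyps; decide)]
  rw [pvScan_rep _ _ _ (by unfold pvHyps; decide)]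
  rw [pvScan_rep _ _ _ (by unfold pvHyps; decide)]
  rw [pvScan_rep _ _ _ (by unfold pvHyps; decide)]
  rw [pvScan_rep _ _ _ (by unfold pvHyps; decide)]
  rw [pvScan_rep _ _ _ (by unfold pvHyps; decide)]
  rfl
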